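-- pv_equiv track=rewrite | github.com/VectorInstitute/eval-agents | aieng-eval-agents/aieng/agent_evals/knowledge_agent/plan_parsing.py | extract_reasoning_text
-- ===== SOURCE A (Python) =====
-- PLANNING_TAG = "/*PLANNING*/"
--
-- REPLANNING_TAG = "/*REPLANNING*/"
--
-- REASONING_TAG = "/*REASONING*/"
--
-- ACTION_TAG = "/*ACTION*/"
--
-- FINAL_ANSWER_TAG = "/*FINAL_ANSWER*/"
--
-- def extract_reasoning_text(text: str) -> str | None:
--     """Extract reasoning text from REASONING tag.
--
--     Parameters
--     ----------
--     text : str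
--         Text that may contain reasoning tag.
--
--     Returns
--     -------
--     str | None
--         The reasoning text if found, None otherwise.
--     """
--     if REASONING_TAG not in text:
--         return None
--
--     start = text.find(REASONING_TAG) + len(REASONING_TAG)
--     end = len(text)
--     for end_tag in [ACTION_TAG, FINAL_ANSWER_TAG, PLANNING_TAG, REPLANNING_TAG]:
--         if end_tag in text[start:]:
--             tag_pos = text.find(end_tag, start)
--             if tag_pos != -1 and tag_pos < end:
--                 end = tag_pos
--     return text[start:end].strip() or None
-- ===== SOURCE B (Python) =====
-- PLANNING_TAG = "/*PLANNING*/"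
-- REPLANNING_TAG = "/*REPLANNING*/"
-- REASONING_TAG = "/*REASONING*/"
-- ACTION_TAG = "/*ACTION*/"
-- FINAL_ANSWER_TAG = "/*FINAL_ANSWER*/"
--
-- _END_TAGS = (ACTION_TAG, FINAL_ANSWER_TAG, PLANNING_TAG, REPLANNING_TAG)
--
--
-- def extract_reasoning_text(text: str) -> str | None:
--     """Single left-to-right scan: cut the suffix after the REASONING tag at the
--     first position where any end tag starts."""
--     idx = text.find(REASONING_TAG)
--     if idx == -1:
--         return None
--     tail = text[idx + len(REASONING_TAG):]
--     body = tail
--     for i in range(len(tail)):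
--         if tail.startswith(_END_TAGS, i):
--             body = tail[:i]
--             break
--     return body.strip() or None
-- ===== Notes on version B (the rewrite author's own statement) =====
-- stated objective: alternative
-- what changed: Replaces A's four separate find-and-minimize passes over the suffix with a single left-to-right scan of the suffix that stops at the first position where any end tag starts.
import Mathlib
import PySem

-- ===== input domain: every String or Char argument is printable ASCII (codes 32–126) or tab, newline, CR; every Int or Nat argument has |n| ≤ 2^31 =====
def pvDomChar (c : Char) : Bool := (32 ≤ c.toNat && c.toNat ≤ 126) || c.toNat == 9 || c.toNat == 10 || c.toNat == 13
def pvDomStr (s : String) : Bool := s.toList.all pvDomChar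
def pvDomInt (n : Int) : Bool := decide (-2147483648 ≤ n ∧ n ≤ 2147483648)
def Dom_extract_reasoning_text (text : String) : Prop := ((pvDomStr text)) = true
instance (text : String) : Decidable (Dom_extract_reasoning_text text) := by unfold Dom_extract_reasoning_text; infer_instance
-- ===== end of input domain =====

-- B replaces A's four find-and-minimize passes over the suffix with a single left-to-right scan
-- of the suffix that stops at the first position where any end tag starts (alternative algorithm,
-- same return value).

-- ===== PORT A =====
-- the module end-tag constants, in A's loop order
def pvEndTags : List String := ["/*ACTION*/", "/*FINAL_ANSWER*/", "/*PLANNING*/", "/*REPLANNING*/"]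

def extract_reasoning_text (text : String) : Option String :=
  if PySem.Str.isIn "/*REASONING*/" text = false then none
  else
    let start : Int := PySem.Str.find text "/*REASONING*/" + 13
    let e : Int := pvEndTags.foldl (fun e end_tag =>
        if PySem.Str.isIn end_tag (PySem.Str.slice text (some start) none) = true then
          let tag_pos := PySem.Str.findFrom text end_tag start
          if tag_pos ≠ -1 ∧ tag_pos < e then tag_pos else e
        else e) (PySem.Str.len text)
    let r := PySem.Str.strip (PySem.Str.slice text (some start) (some e))
    if r = "" then none else some r

-- ===== PORT B =====
-- the end-tag tuple of Source B, as character lists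
def pvEndTagsB : List (List Char) :=
  ["/*ACTION*/".toList, "/*FINAL_ANSWER*/".toList, "/*PLANNING*/".toList, "/*REPLANNING*/".toList]

-- Source B's scan loop: first index of the tail at which some end tag starts (tail length if none)
def pvScanEnd (cs : List Char) : Nat :=
  match cs with
  | [] => 0
  | c :: rest =>
      if pvEndTagsB.any (fun t => PySem.Chars.startswith (c :: rest) t) then 0
      else pvScanEnd rest + 1

def extract_reasoning_text_alt (text : String) : Option String :=
  let idx := PySem.Str.find text "/*REASONING*/"
  if idx = -1 then none
  else
    let tail := PySem.Str.slice text (some (idx + 13)) none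
    let body := String.ofList (List.take (pvScanEnd tail.toList) tail.toList)
    let r := PySem.Str.strip body
    if r = "" then none else some r

-- ===== PRECONDITION & SPEC =====
def Spec_extract_reasoning_text (text : String) (out : Option String) : Prop := out = extract_reasoning_text_alt text
instance (text : String) (out : Option String) : Decidable (Spec_extract_reasoning_text text out) := by unfold Spec_extract_reasoning_text; infer_instance

-- ===== CLAIM (what is proved, stated in full; the proofs are below) =====
def Claim_equal_extract_reasoning_text : Prop := ∀ (text : String), Dom_extract_reasoning_text text → Spec_extract_reasoning_text text (extract_reasoning_text text)

-- ===== LEMMAS AND PROOFS =====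

-- the A-side minimisation step, relative to the suffix cs
def pvStep (cs : List Char) (e : Nat) (t : List Char) : Nat :=
  if PySem.Chars.isIn t cs = true then min (PySem.Chars.find cs t).toNat e else e

theorem pv_find_eq_of_first (cs sub : List Char) (k : Nat)
    (h1 : sub <+: cs.drop k) (h2 : ∀ i < k, ¬ sub <+: cs.drop i) :
    PySem.Chars.find cs sub = (k : Int) := by
  have hinf : sub <:+: cs := h1.isInfix.trans (List.drop_suffix k cs).isInfix
  have hnn : 0 ≤ PySem.Chars.find cs sub := (PySem.Chars.find_nonneg_iff cs sub).mpr hinf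
  obtain ⟨hpre, hmin⟩ := PySem.Chars.find_spec hnn
  have hF : PySem.Chars.find cs sub = ((PySem.Chars.find cs sub).toNat : Int) :=
    (Int.toNat_of_nonneg hnn).symm
  rcases Nat.lt_trichotomy (PySem.Chars.find cs sub).toNat k with h | h | h
  · exact absurd hpre (h2 _ h)
  · rw [hF, h]
  · exact absurd h1 (hmin k h)

theorem pv_find_prefix (cs sub : List Char) (h : sub <+: cs) :
    PySem.Chars.find cs sub = 0 := by
  have := pv_find_eq_of_first cs sub 0 (by simpa using h) (by omega)
  simpa using this

theorem pv_find_cons (c : Char) (rest sub : List Char)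
    (hnp : ¬ sub <+: (c :: rest)) (hin : sub <:+: rest) :
    PySem.Chars.find (c :: rest) sub = PySem.Chars.find rest sub + 1 := by
  have hnn : 0 ≤ PySem.Chars.find rest sub := (PySem.Chars.find_nonneg_iff rest sub).mpr hin
  obtain ⟨hpre, hmin⟩ := PySem.Chars.find_spec hnn
  have := pv_find_eq_of_first (c :: rest) sub ((PySem.Chars.find rest sub).toNat + 1)
    (by simpa using hpre)
    (by
      intro i hi
      cases i with
      | zero => simpa using hnp
      | succ j => simpa using hmin j (by omega))
  rw [this]
  have h2 := Int.toNat_of_nonneg hnn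
  omega

theorem pv_isIn_cons (c : Char) (rest sub : List Char) (hnp : ¬ sub <+: (c :: rest)) :
    PySem.Chars.isIn sub (c :: rest) = PySem.Chars.isIn sub rest := by
  by_cases h : sub <:+: rest
  · rw [(PySem.Chars.isIn_iff_infix sub (c :: rest)).mpr (List.infix_cons_iff.mpr (Or.inr h)),
      (PySem.Chars.isIn_iff_infix sub rest).mpr h]
  · rw [(PySem.Chars.isIn_eq_false_iff sub (c :: rest)).mpr
      (by rw [List.infix_cons_iff]; tauto),
      (PySem.Chars.isIn_eq_false_iff sub rest).mpr h]

theorem pv_fold_le_init (tags : List (List Char)) (cs : List Char) (a : Nat) :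
    tags.foldl (pvStep cs) a ≤ a := by
  induction tags generalizing a with
  | nil => simp
  | cons t ts ih =>
      refine le_trans (ih _) ?_
      simp only [pvStep]
      split <;> omega

theorem pv_fold_le_find (tags : List (List Char)) (cs t : List Char) (a : Nat)
    (ht : t ∈ tags) (hin : PySem.Chars.isIn t cs = true) :
    tags.foldl (pvStep cs) a ≤ (PySem.Chars.find cs t).toNat := by
  induction tags generalizing a with
  | nil => simp at ht
  | cons u ts ih =>
      rcases List.mem_cons.mp ht with rfl | hmem
      · refine le_trans (pv_fold_le_init ts cs _) ?_
        simp only [pvStep, hin, if_true]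
        omega
      · exact ih _ hmem

theorem pv_fold_shift (tags : List (List Char)) (c : Char) (rest : List Char)
    (hnp : ∀ t ∈ tags, ¬ t <+: (c :: rest)) (e : Nat) :
    tags.foldl (pvStep (c :: rest)) (e + 1) = tags.foldl (pvStep rest) e + 1 := by
  induction tags generalizing e with
  | nil => simp
  | cons t ts ih =>
      have hnpt := hnp t (List.mem_cons_self ..)
      have hnps : ∀ u ∈ ts, ¬ u <+: (c :: rest) := fun u hu => hnp u (List.mem_cons_of_mem _ hu)
      simp only [List.foldl_cons]
      have hii := pv_isIn_cons c rest t hnpt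
      by_cases hin : PySem.Chars.isIn t rest = true
      · have hfind := pv_find_cons c rest t hnpt ((PySem.Chars.isIn_iff_infix t rest).mp hin)
        have hnn : 0 ≤ PySem.Chars.find rest t :=
          (PySem.Chars.find_nonneg_iff rest t).mpr ((PySem.Chars.isIn_iff_infix t rest).mp hin)
        have htn : (PySem.Chars.find (c :: rest) t).toNat = (PySem.Chars.find rest t).toNat + 1 := by
          have := Int.toNat_of_nonneg hnn; omega
        rw [show pvStep (c :: rest) (e + 1) t = pvStep rest e t + 1 by
          simp only [pvStep, hii, hin, if_true, htn]; omega]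
        exact ih hnps _
      · rw [show pvStep (c :: rest) (e + 1) t = e + 1 by
            simp [pvStep, hii, hin],
          show pvStep rest e t = e by simp [pvStep, hin]]
        exact ih hnps _

theorem pv_scan_eq_fold (cs : List Char) :
    pvScanEnd cs = pvEndTagsB.foldl (pvStep cs) cs.length := by
  induction cs with
  | nil => decide
  | cons c rest ih =>
      by_cases hp : pvEndTagsB.any (fun t => PySem.Chars.startswith (c :: rest) t) = true
      · obtain ⟨t, ht, hts⟩ := List.any_eq_true.mp hp
        have hpre : t <+: (c :: rest) := (PySem.Chars.startswith_iff _ _).mp hts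
        have hin : PySem.Chars.isIn t (c :: rest) = true :=
          (PySem.Chars.isIn_iff_infix _ _).mpr hpre.isInfix
        have hle := pv_fold_le_find pvEndTagsB (c :: rest) t (c :: rest).length ht hin
        rw [pv_find_prefix _ _ hpre] at hle
        simp only [pvScanEnd, hp, if_true]
        omega
      · have hnp : ∀ t ∈ pvEndTagsB, ¬ t <+: (c :: rest) := by
          intro t ht hpre
          exact hp (List.any_eq_true.mpr ⟨t, ht, (PySem.Chars.startswith_iff _ _).mpr hpre⟩)
        simp only [pvScanEnd, hp, Bool.false_eq_true, if_false, List.length_cons]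
        rw [pv_fold_shift pvEndTagsB c rest hnp, ih]

theorem pv_absFold_eq (tags : List String) (text : String) (k : Nat)
    (hk : k ≤ text.toList.length) (e : Nat) :
    tags.foldl (fun e end_tag =>
        if PySem.Str.isIn end_tag (PySem.Str.slice text (some (k : Int)) none) = true then
          let tag_pos := PySem.Str.findFrom text end_tag (k : Int)
          if tag_pos ≠ -1 ∧ tag_pos < e then tag_pos else e
        else e) ((k : Int) + (e : Int))
      = (k : Int) + (((tags.map String.toList).foldl (pvStep (text.toList.drop k)) e : Nat) : Int) := by
  induction tags generalizing e with
  | nil => simp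
  | cons t ts ih =>
      simp only [List.foldl_cons, List.map_cons]
      have hsl : (PySem.Str.slice text (some (k : Int)) none).toList = text.toList.drop k := by
        simp [PySem.Str.toList_slice, PySem.Chars.slice_eq_listSlice,
          PySem.List.slice_from _ (by omega : (0:Int) ≤ (k:Int))]
      have hisIn : PySem.Str.isIn t (PySem.Str.slice text (some (k : Int)) none)
          = PySem.Chars.isIn t.toList (text.toList.drop k) := by
        rw [PySem.Str.isIn_eq, hsl]
      by_cases hin : PySem.Chars.isIn t.toList (text.toList.drop k) = true
      · have hinf : t.toList <:+: text.toList.drop k := (PySem.Chars.isIn_iff_infix _ _).mp hin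
        have hfne : PySem.Chars.find (text.toList.drop k) t.toList ≠ -1 :=
          (PySem.Chars.find_ne_neg_one_iff _ _).mpr hinf
        have hfnn : 0 ≤ PySem.Chars.find (text.toList.drop k) t.toList :=
          (PySem.Chars.find_nonneg_iff _ _).mpr hinf
        have hff : PySem.Str.findFrom text t (k : Int)
            = (k : Int) + PySem.Chars.find (text.toList.drop k) t.toList := by
          rw [PySem.Str.findFrom_eq, PySem.Chars.findFrom_natCast _ _ k hk, if_neg hfne]
        have htn := Int.toNat_of_nonneg hfnn
        rw [show (if PySem.Str.isIn t (PySem.Str.slice text (some (k : Int)) none) = true then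
          let tag_pos := PySem.Str.findFrom text t (k : Int)
          if tag_pos ≠ -1 ∧ tag_pos < ((k : Int) + (e : Int)) then tag_pos else ((k : Int) + (e : Int))
          else ((k : Int) + (e : Int))) = (k : Int) + (pvStep (text.toList.drop k) e t.toList : Nat) by
          rw [hisIn, if_pos hin]
          simp only [hff, pvStep, hin, if_true]
          by_cases hlt : (PySem.Chars.find (text.toList.drop k) t.toList).toNat < e
          · rw [if_pos ⟨by omega, by omega⟩]
            omega
          · rw [if_neg (by omega)]
            omega]
        exact ih _
      · rw [show (if PySem.Str.isIn t (PySem.Str.slice text (some (k : Int)) none) = true then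
          let tag_pos := PySem.Str.findFrom text t (k : Int)
          if tag_pos ≠ -1 ∧ tag_pos < ((k : Int) + (e : Int)) then tag_pos else ((k : Int) + (e : Int))
          else ((k : Int) + (e : Int))) = (k : Int) + (pvStep (text.toList.drop k) e t.toList : Nat) by
          rw [hisIn, if_neg (by simp [hin]), pvStep, if_neg (by simp [hin])]]
        exact ih _

set_option maxHeartbeats 1000000 in
theorem main_eq (text : String) : extract_reasoning_text text = extract_reasoning_text_alt text := by
  unfold extract_reasoning_text extract_reasoning_text_alt
  by_cases hinf : "/*REASONING*/".toList <:+: text.toList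
  · -- tag present
    have h1 : PySem.Str.isIn "/*REASONING*/" text = true := by
      rw [PySem.Str.isIn_eq]; exact (PySem.Chars.isIn_iff_infix _ _).mpr hinf
    have hnn : 0 ≤ PySem.Chars.find text.toList "/*REASONING*/".toList :=
      (PySem.Chars.find_nonneg_iff _ _).mpr hinf
    have hfind : PySem.Str.find text "/*REASONING*/"
        = ((PySem.Chars.find text.toList "/*REASONING*/".toList).toNat : Int) := by
      rw [PySem.Str.find_eq]; exact (Int.toNat_of_nonneg hnn).symm
    set K : Nat := (PySem.Chars.find text.toList "/*REASONING*/".toList).toNat with hK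
    have hpre : "/*REASONING*/".toList <+: text.toList.drop K := by
      have := (PySem.Chars.find_spec hnn).1
      rwa [← hK] at this
    have hK13 : K + 13 ≤ text.toList.length := by
      have hlen := hpre.length_le
      rw [List.length_drop] at hlen
      have h13 : ("/*REASONING*/".toList).length = 13 := by decide
      omega
    -- the A-side start as a Nat cast
    have hstart : PySem.Str.find text "/*REASONING*/" + 13 = ((K + 13 : Nat) : Int) := by
      rw [hfind]; push_cast; ring
    have hlenSplit : PySem.Str.len text
        = ((K + 13 : Nat) : Int) + ((text.toList.length - (K + 13) : Nat) : Int) := by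
      rw [PySem.Str.len_eq]; push_cast; omega
    set tailL : List Char := text.toList.drop (K + 13) with htail
    have htlen : tailL.length = text.toList.length - (K + 13) := by
      simp [htail]
    have hmap : pvEndTags.map String.toList = pvEndTagsB := by decide
    set E : Nat := pvEndTagsB.foldl (pvStep tailL) tailL.length with hE
    have hfold :
        pvEndTags.foldl (fun e end_tag =>
          if PySem.Str.isIn end_tag (PySem.Str.slice text (some ((K + 13 : Nat) : Int)) none) = true then
            let tag_pos := PySem.Str.findFrom text end_tag ((K + 13 : Nat) : Int)
            if tag_pos ≠ -1 ∧ tag_pos < e then tag_pos else e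
          else e) (PySem.Str.len text) = ((K + 13 : Nat) : Int) + (E : Int) := by
      rw [hlenSplit, pv_absFold_eq pvEndTags text (K + 13) hK13, hmap, hE, htlen]
    -- B's tail string has tailL as its characters
    have hBtail : (PySem.Str.slice text (some ((K + 13 : Nat) : Int)) none).toList
        = tailL := by
      rw [PySem.Str.toList_slice, PySem.Chars.slice_eq_listSlice,
        PySem.List.slice_from _ (by omega : (0:Int) ≤ ((K + 13 : Nat) : Int))]
      rw [htail, Int.toNat_natCast]
    -- the A-side slice is take E tailL
    have hAslice : (PySem.Str.slice text (some ((K + 13 : Nat) : Int))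
        (some (((K + 13 : Nat) : Int) + (E : Int)))).toList = List.take E tailL := by
      rw [PySem.Str.toList_slice, PySem.Chars.slice_eq_listSlice]
      rw [show ((K + 13 : Nat) : Int) + (E : Int) = ((K + 13 + E : Nat) : Int) by push_cast; ring]
      rw [PySem.List.slice_natCast]
      congr 1
      omega
    have hscan : pvScanEnd tailL = E := by
      rw [pv_scan_eq_fold, hE]
    -- the two stripped strings coincide
    have hr : PySem.Str.strip (PySem.Str.slice text (some ((K + 13 : Nat) : Int))
          (some (((K + 13 : Nat) : Int) + (E : Int))))
        = PySem.Str.strip (String.ofList (List.take (pvScanEnd ((PySem.Str.slice text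
          (some ((K + 13 : Nat) : Int)) none).toList))
          ((PySem.Str.slice text (some ((K + 13 : Nat) : Int)) none).toList))) := by
      apply String.toList_inj.mp
      rw [PySem.Str.toList_strip, PySem.Str.toList_strip, hBtail, hscan, hAslice,
        String.toList_ofList]
    show (if PySem.Str.isIn "/*REASONING*/" text = false then none
      else
        if PySem.Str.strip (PySem.Str.slice text
            (some (PySem.Str.find text "/*REASONING*/" + 13))
            (some (pvEndTags.foldl (fun e end_tag =>
              if PySem.Str.isIn end_tag (PySem.Str.slice text
                  (some (PySem.Str.find text "/*REASONING*/" + 13)) none) = true then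
                let tag_pos := PySem.Str.findFrom text end_tag
                  (PySem.Str.find text "/*REASONING*/" + 13)
                if tag_pos ≠ -1 ∧ tag_pos < e then tag_pos else e
              else e) (PySem.Str.len text)))) = "" then none
        else some (PySem.Str.strip (PySem.Str.slice text
            (some (PySem.Str.find text "/*REASONING*/" + 13))
            (some (pvEndTags.foldl (fun e end_tag =>
              if PySem.Str.isIn end_tag (PySem.Str.slice text
                  (some (PySem.Str.find text "/*REASONING*/" + 13)) none) = true then
                let tag_pos := PySem.Str.findFrom text end_tag
                  (PySem.Str.find text "/*REASONING*/" + 13)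
                if tag_pos ≠ -1 ∧ tag_pos < e then tag_pos else e
              else e) (PySem.Str.len text))))))
      = (if PySem.Str.find text "/*REASONING*/" = -1 then none
      else
        if PySem.Str.strip (String.ofList (List.take (pvScanEnd ((PySem.Str.slice text
            (some (PySem.Str.find text "/*REASONING*/" + 13)) none).toList))
            ((PySem.Str.slice text
            (some (PySem.Str.find text "/*REASONING*/" + 13)) none).toList))) = "" then none
        else some (PySem.Str.strip (String.ofList (List.take (pvScanEnd ((PySem.Str.slice text
            (some (PySem.Str.find text "/*REASONING*/" + 13)) none).toList))
            ((PySem.Str.slice text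
            (some (PySem.Str.find text "/*REASONING*/" + 13)) none).toList)))))
    rw [hstart, hfold, hr]
    rw [if_neg (show ¬ (PySem.Str.isIn "/*REASONING*/" text = false) by simp only [h1]; decide),
      if_neg (show ¬ (PySem.Str.find text "/*REASONING*/" = -1) by rw [hfind]; omega)]
  · -- tag absent: both none
    have h1 : PySem.Str.isIn "/*REASONING*/" text = false := by
      rw [PySem.Str.isIn_eq]; exact (PySem.Chars.isIn_eq_false_iff _ _).mpr hinf
    have h2 : PySem.Str.find text "/*REASONING*/" = -1 := by
      rw [PySem.Str.find_eq]; exact (PySem.Chars.find_eq_neg_one_iff _ _).mpr hinf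
    simp only [h1, h2]
    rw [if_pos trivial, if_pos trivial]

-- ===== VERDICT (by name: the statement is the Claim_ definition above) =====
theorem extract_reasoning_text_spec : Claim_equal_extract_reasoning_text := by
  intro text _
  unfold Spec_extract_reasoning_text
  exact main_eq text
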